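-- pv_equiv track=rewrite | github.com/chockseswaramurthy/aoc | 2023/day1/puzzle1.py | find_number_and_position_by_word
-- ===== SOURCE A (Python) =====
-- from typing import Optional, List, Dict, Tuple
--
-- NUMBER_MAP = {
--     'one': '1',
--     'two': '2',
--     'three': '3',
--     'four': '4',
--     'five': '5',
--     'six': '6',
--     'seven': '7',
--     'eight': '8',
--     'nine': '9'
-- }
--
-- def find_number_and_position_by_word(input_str: str) -> Dict[str, str]:
--     return_dict = {}
--     for key, value in NUMBER_MAP.items():
--         if key in input_str:
--             indexes = [i for i, _ in enumerate(input_str) if input_str.startswith(key, i)]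
--             for index in indexes:
--                 return_dict[index] = value
--
--     return return_dict
-- ===== SOURCE B (Python) =====
-- NUMBER_MAP = {
--     'one': '1',
--     'two': '2',
--     'three': '3',
--     'four': '4',
--     'five': '5',
--     'six': '6',
--     'seven': '7',
--     'eight': '8',
--     'nine': '9'
-- }
--
--
-- def _digit_at(input_str, i):
--     for word, digit in NUMBER_MAP.items():
--         if input_str.startswith(word, i):
--             return digit
--     return None
--
--
-- def find_number_and_position_by_word(input_str):
--     # One left-to-right scan over positions, grouping the match positions
--     # by digit; the dict is then emitted digit by digit.
--     buckets = {digit: [] for digit in NUMBER_MAP.values()}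
--     for i in range(len(input_str)):
--         digit = _digit_at(input_str, i)
--         if digit is not None:
--             buckets[digit].append(i)
--     return {i: digit for digit, indexes in buckets.items() for i in indexes}
-- ===== Notes on version B (the rewrite author's own statement) =====
-- stated objective: alternative
-- what changed: A does a word-outer pass (substring test, then a full index scan per word) inserting into the dict word by word; B does one position-outer left-to-right scan that finds the digit word starting at each index and groups the match positions by digit before emitting the dict.
import Mathlib
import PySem

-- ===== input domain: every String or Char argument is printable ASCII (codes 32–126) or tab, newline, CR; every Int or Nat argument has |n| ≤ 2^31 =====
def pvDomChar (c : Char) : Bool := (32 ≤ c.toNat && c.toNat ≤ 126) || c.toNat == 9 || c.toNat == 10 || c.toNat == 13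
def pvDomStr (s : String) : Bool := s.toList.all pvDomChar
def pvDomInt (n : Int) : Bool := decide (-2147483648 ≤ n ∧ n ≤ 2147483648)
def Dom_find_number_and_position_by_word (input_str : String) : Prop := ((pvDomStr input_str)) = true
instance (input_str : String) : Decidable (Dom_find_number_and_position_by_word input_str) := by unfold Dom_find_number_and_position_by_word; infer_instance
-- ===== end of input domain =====

-- B replaces A's word-outer nested scans by one position-outer scan that groups match
-- positions by digit (alternative decomposition, same return value including dict order).

def NUMBER_MAP : List (String × String) :=
  [("one", "1"), ("two", "2"), ("three", "3"), ("four", "4"), ("five", "5"),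
   ("six", "6"), ("seven", "7"), ("eight", "8"), ("nine", "9")]

-- input_str.startswith(key, i); exact for 0 ≤ i (every call site passes a non-negative index)
def pvStartsAt (cs : List Char) (w : String) (i : Int) : Bool :=
  PySem.Chars.startswith (cs.drop i.toNat) w.toList

-- ===== PORT A =====
def find_number_and_position_by_word (input_str : String) : List (Int × String) :=
  (NUMBER_MAP.foldl
    (fun return_dict kv =>
      if PySem.Str.isIn kv.1 input_str then
        ((((PySem.List.enumerate input_str.toList).filter
              (fun p => pvStartsAt input_str.toList kv.1 p.1)).map (fun p => p.1)).foldl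
          (fun d index => d.insert index kv.2) return_dict)
      else return_dict)
    (PySem.Dict.empty : PySem.Dict Int String)).items

-- ===== PORT B =====
-- _digit_at: first (word, digit) of NUMBER_MAP whose word starts at i, if any
def pvDigitAt (cs : List Char) (i : Int) : Option String :=
  (NUMBER_MAP.find? (fun kv => pvStartsAt cs kv.1 i)).map (fun kv => kv.2)

-- buckets = {digit: [] for digit in NUMBER_MAP.values()}
def pvBuckets0 : PySem.Dict String (List Int) :=
  (NUMBER_MAP.map (fun kv => kv.2)).foldl (fun b digit => b.insert digit []) PySem.Dict.empty

-- the position-outer scan filling the buckets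
def pvScan (cs : List Char) : PySem.Dict String (List Int) :=
  (PySem.List.pyRange 0 (PySem.Chars.len cs)).foldl
    (fun b i =>
      match pvDigitAt cs i with
      | some digit => b.modify digit [] (fun l => l ++ [i])
      | none => b)
    pvBuckets0

def find_number_and_position_by_word_alt (input_str : String) : List (Int × String) :=
  ((pvScan input_str.toList).items.foldl
      (fun out p => p.2.foldl (fun out i => out.insert i p.1) out)
      (PySem.Dict.empty : PySem.Dict Int String)).items

-- ===== PRECONDITION & SPEC =====
def Spec_find_number_and_position_by_word (input_str : String) (out : List (Int × String)) : Prop := out = find_number_and_position_by_word_alt input_str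
instance (input_str : String) (out : List (Int × String)) : Decidable (Spec_find_number_and_position_by_word input_str out) := by unfold Spec_find_number_and_position_by_word; infer_instance

-- ===== CLAIM (what is proved, stated in full; the proofs are below) =====
def Claim_equal_find_number_and_position_by_word : Prop := ∀ (input_str : String), Dom_find_number_and_position_by_word input_str → Spec_find_number_and_position_by_word input_str (find_number_and_position_by_word input_str)

-- ===== LEMMAS AND PROOFS =====

-- the match positions of one word, and the word-by-word pair list both ports flatten to
def pvPositions (cs : List Char) (w : String) : List Int :=
  ((PySem.List.enumerate cs).filter (fun p => pvStartsAt cs w p.1)).map (fun p => p.1)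

def pvPairs (cs : List Char) : List (Int × String) :=
  NUMBER_MAP.flatMap (fun kv => (pvPositions cs kv.1).map (fun i => (i, kv.2)))

theorem pv_prefix_eq : ∀ kv ∈ NUMBER_MAP, ∀ kv' ∈ NUMBER_MAP,
    kv.1.toList <+: kv'.1.toList → kv = kv' := by decide

theorem pv_snd_inj : ∀ kv ∈ NUMBER_MAP, ∀ kv' ∈ NUMBER_MAP, kv.2 = kv'.2 → kv = kv' := by decide

theorem pv_digits_nodup : (NUMBER_MAP.map (fun kv => kv.2)).Nodup := by decide

theorem pv_unique {cs : List Char} {i : Int} {kv kv' : String × String}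
    (h : kv ∈ NUMBER_MAP) (h' : kv' ∈ NUMBER_MAP)
    (hs : pvStartsAt cs kv.1 i = true) (hs' : pvStartsAt cs kv'.1 i = true) : kv = kv' := by
  rw [pvStartsAt, PySem.Chars.startswith_iff] at hs hs'
  rcases List.prefix_or_prefix_of_prefix hs hs' with hp | hp
  · exact pv_prefix_eq kv h kv' h' hp
  · exact (pv_prefix_eq kv' h' kv h hp).symm

theorem mem_pvPositions {cs : List Char} {w : String} {i : Int}
    (h : i ∈ pvPositions cs w) : pvStartsAt cs w i = true := by
  simp only [pvPositions, List.mem_map, List.mem_filter] at h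
  obtain ⟨p, ⟨_, hp⟩, rfl⟩ := h
  exact hp

theorem pvPositions_nodup (cs : List Char) (w : String) : (pvPositions cs w).Nodup := by
  have h1 : ((PySem.List.enumerate cs).filter
      (fun p => pvStartsAt cs w p.1)).Pairwise (fun p q => p.1 < q.1) :=
    (PySem.List.pairwise_lt_enumerate cs 0).filter _
  refine List.Pairwise.map _ ?_ h1
  intro p q hpq
  exact ne_of_lt hpq

theorem pvPositions_eq_filter_range (cs : List Char) (w : String) :
    pvPositions cs w = (PySem.List.pyRange 0 (PySem.Chars.len cs)).filter
      (fun i => pvStartsAt cs w i) := by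
  have := List.filter_map (f := fun p : Int × Char => p.1)
    (p := fun i => pvStartsAt cs w i) (l := PySem.List.enumerate cs 0)
  simp only [Function.comp_def] at this
  rw [pvPositions, ← this, PySem.List.map_fst_enumerate, PySem.Chars.len_eq, zero_add]

theorem pvPositions_eq_nil_of_not_isIn {cs : List Char} {w : String}
    (h : PySem.Chars.isIn w.toList cs = false) : pvPositions cs w = [] := by
  rw [List.eq_nil_iff_forall_not_mem]
  intro i hi
  have hs := mem_pvPositions hi
  rw [pvStartsAt, PySem.Chars.startswith_iff] at hs
  have : PySem.Chars.isIn w.toList cs = true :=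
    (PySem.Chars.exists_prefix_drop_iff_isIn _ _).mp ⟨i.toNat, hs⟩
  simp [this] at h

theorem pv_foldl_insert_items (pairs : List (Int × String))
    (h : (pairs.map (fun p => p.1)).Nodup) :
    (pairs.foldl (fun d p => d.insert p.1 p.2)
      (PySem.Dict.empty : PySem.Dict Int String)).items = pairs := by
  have := PySem.Dict.items_foldl_insert_fresh pairs (fun p => p.1) (fun p => p.2)
    PySem.Dict.empty (by intro a _; simp [PySem.Dict.contains_empty]) h
  simpa using this

theorem pvPairs_fst_nodup (cs : List Char) : ((pvPairs cs).map (fun p => p.1)).Nodup := by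
  rw [pvPairs, List.map_flatMap]
  simp only [List.map_map, Function.comp_def]
  have : (fun kv : String × String => List.map (fun i => i) (pvPositions cs kv.1)) =
      (fun kv => pvPositions cs kv.1) := by
    funext kv; exact List.map_id _
  rw [this, List.nodup_flatMap]
  constructor
  · intro kv _; exact pvPositions_nodup cs kv.1
  · have hnd : NUMBER_MAP.Pairwise (· ≠ ·) := by decide
    refine List.Pairwise.imp_of_mem ?_ hnd
    intro kv kv' hmem hmem' hne i hi hi'
    exact hne (pv_unique hmem hmem' (mem_pvPositions hi) (mem_pvPositions hi'))

theorem pv_A_eq_pvPairs (input_str : String) :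
    find_number_and_position_by_word input_str = pvPairs input_str.toList := by
  rw [find_number_and_position_by_word]
  have hfun : (fun (return_dict : PySem.Dict Int String) (kv : String × String) =>
      if PySem.Str.isIn kv.1 input_str then
        ((((PySem.List.enumerate input_str.toList).filter
              (fun p => pvStartsAt input_str.toList kv.1 p.1)).map (fun p => p.1)).foldl
          (fun d index => d.insert index kv.2) return_dict)
      else return_dict) =
      (fun return_dict kv =>
        (((pvPositions input_str.toList kv.1).map (fun i => (i, kv.2))).foldl
          (fun d p => d.insert p.1 p.2) return_dict)) := by
    funext d kv
    by_cases h : PySem.Str.isIn kv.1 input_str = true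
    · rw [if_pos h]
      simp only [pvPositions, List.foldl_map]
    · rw [if_neg h]
      rw [Bool.not_eq_true, PySem.Str.isIn_eq] at h
      rw [pvPositions_eq_nil_of_not_isIn h]
      rfl
  rw [hfun, ← List.foldl_flatMap]
  exact pv_foldl_insert_items _ (pvPairs_fst_nodup _)

theorem pvBuckets0_items :
    pvBuckets0.items = (NUMBER_MAP.map (fun kv => kv.2)).map
      (fun dg => (dg, ([] : List Int))) := by
  have := PySem.Dict.items_foldl_insert_fresh (NUMBER_MAP.map (fun kv => kv.2))
    (fun dg => dg) (fun _ => ([] : List Int)) PySem.Dict.empty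
    (by intro a _; simp [PySem.Dict.contains_empty]) (by simpa using pv_digits_nodup)
  simpa [pvBuckets0] using this

theorem pvBuckets0_keys : pvBuckets0.keys = NUMBER_MAP.map (fun kv => kv.2) := by
  simp only [PySem.Dict.keys, pvBuckets0_items, List.map_map, Function.comp_def]

theorem pvBuckets0_getD {dg : String} (h : dg ∈ NUMBER_MAP.map (fun kv => kv.2)) :
    pvBuckets0.getD dg [] = [] := by
  refine PySem.Dict.getD_of_mem_items pvBuckets0 ?_ ?_ []
  · rw [pvBuckets0_items]
    exact List.mem_map.mpr ⟨dg, h, rfl⟩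
  · rw [pvBuckets0_keys]; exact pv_digits_nodup

theorem pvDigitAt_mem {cs : List Char} {i : Int} {dg : String}
    (h : pvDigitAt cs i = some dg) : dg ∈ NUMBER_MAP.map (fun kv => kv.2) := by
  rw [pvDigitAt, Option.map_eq_some_iff] at h
  obtain ⟨kv, hf, rfl⟩ := h
  exact List.mem_map.mpr ⟨kv, List.mem_of_find?_eq_some hf, rfl⟩

theorem pvDigitAt_iff {cs : List Char} {i : Int} {kv : String × String}
    (h : kv ∈ NUMBER_MAP) :
    (pvDigitAt cs i = some kv.2) ↔ pvStartsAt cs kv.1 i = true := by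
  constructor
  · intro hd
    rw [pvDigitAt, Option.map_eq_some_iff] at hd
    obtain ⟨kv', hf, heq⟩ := hd
    have hm := List.mem_of_find?_eq_some hf
    have hp := List.find?_some hf
    have : kv' = kv := pv_snd_inj kv' hm kv h heq
    rwa [this] at hp
  · intro hs
    have hsome : (NUMBER_MAP.find? (fun kv => pvStartsAt cs kv.1 i)).isSome = true :=
      List.find?_isSome.mpr ⟨kv, h, hs⟩
    obtain ⟨kv', hf⟩ := Option.isSome_iff_exists.mp hsome
    have hm := List.mem_of_find?_eq_some hf
    have hp := List.find?_some hf
    have : kv' = kv := pv_unique hm h hp hs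
    rw [pvDigitAt, hf, this]
    rfl

theorem pvScan_keys_aux (cs : List Char) (l : List Int) :
    ∀ b : PySem.Dict String (List Int), b.keys = NUMBER_MAP.map (fun kv => kv.2) →
    (l.foldl (fun b i =>
        match pvDigitAt cs i with
        | some digit => b.modify digit [] (fun l => l ++ [i])
        | none => b) b).keys = NUMBER_MAP.map (fun kv => kv.2) := by
  induction l with
  | nil => intro b hb; simpa using hb
  | cons i l ih =>
    intro b hb
    rw [List.foldl_cons]
    refine ih _ ?_
    cases hd : pvDigitAt cs i with
    | none => simpa using hb
    | some dg =>
      rw [PySem.Dict.keys_modify, PySem.Dict.keys_insert_of_contains, hb]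
      rw [PySem.Dict.contains_iff_mem_keys, hb]
      exact pvDigitAt_mem hd

theorem pvScan_getD_aux (cs : List Char) (l : List Int) (dg : String) :
    ∀ b : PySem.Dict String (List Int),
    (l.foldl (fun b i =>
        match pvDigitAt cs i with
        | some digit => b.modify digit [] (fun l => l ++ [i])
        | none => b) b).getD dg [] =
      b.getD dg [] ++ l.filter (fun i => pvDigitAt cs i == some dg) := by
  induction l with
  | nil => intro b; simp
  | cons i l ih =>
    intro b
    rw [List.foldl_cons, ih]
    cases hd : pvDigitAt cs i with
    | none =>
      rw [List.filter_cons_of_neg (by simp [hd])]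
    | some dg' =>
      simp only [PySem.Dict.getD_modify]
      by_cases h : dg = dg'
      · subst h
        rw [if_pos rfl, List.filter_cons_of_pos (by simp [hd])]
        simp
      · rw [if_neg h, List.filter_cons_of_neg (by simp [hd]; exact fun hh => h hh.symm)]

theorem pvScan_items (cs : List Char) :
    (pvScan cs).items = NUMBER_MAP.map (fun kv => (kv.2, pvPositions cs kv.1)) := by
  have hkeys : (pvScan cs).keys = NUMBER_MAP.map (fun kv => kv.2) :=
    pvScan_keys_aux cs _ pvBuckets0 pvBuckets0_keys
  have hnd : (pvScan cs).keys.Nodup := by rw [hkeys]; exact pv_digits_nodup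
  rw [PySem.Dict.items_eq_map_keys _ hnd [], hkeys, List.map_map]
  refine List.map_congr_left ?_
  intro kv hkv
  simp only [Function.comp_def, Prod.mk.injEq]
  refine ⟨trivial, ?_⟩
  rw [pvScan, pvScan_getD_aux, pvBuckets0_getD (List.mem_map.mpr ⟨kv, hkv, rfl⟩), List.nil_append]
  rw [pvPositions_eq_filter_range]
  refine (List.filter_congr ?_).symm
  intro i _
  have hiff := pvDigitAt_iff (cs := cs) (i := i) hkv
  cases hb : pvStartsAt cs kv.1 i with
  | true => simp [hiff.mpr hb]
  | false =>
    have hne : ¬ pvDigitAt cs i = some kv.2 := fun hc => by simp [hiff.mp hc] at hb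
    simp [hne]

theorem pv_B_eq_pvPairs (input_str : String) :
    find_number_and_position_by_word_alt input_str = pvPairs input_str.toList := by
  rw [find_number_and_position_by_word_alt]
  have hfun : (fun (out : PySem.Dict Int String) (p : String × List Int) =>
      p.2.foldl (fun out i => out.insert i p.1) out) =
      (fun out p => ((p.2.map (fun i => (i, p.1))).foldl
        (fun d q => d.insert q.1 q.2) out)) := by
    funext out p
    rw [List.foldl_map]
  rw [hfun, ← List.foldl_flatMap]
  have hflat : ((pvScan input_str.toList).items.flatMap
      (fun p => p.2.map (fun i => (i, p.1)))) = pvPairs input_str.toList := by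
    rw [pvScan_items, List.flatMap_map]
    rfl
  rw [hflat]
  exact pv_foldl_insert_items _ (pvPairs_fst_nodup _)

-- ===== VERDICT (by name: the statement is the Claim_ definition above) =====
theorem find_number_and_position_by_word_spec : Claim_equal_find_number_and_position_by_word := by
  intro input_str _
  unfold Spec_find_number_and_position_by_word
  rw [pv_A_eq_pvPairs, pv_B_eq_pvPairs]
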